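-- pv_equiv track=rewrite | github.com/divljak/caranalyzer | utils/data_validator.py | clean_make_model
-- ===== SOURCE A (Python) =====
-- def clean_make_model(text: str) -> str:
--     """Clean and standardize car make/model text"""
--     if not text:
--         return ""
--
--     # Remove extra whitespace and convert to title case
--     cleaned = ' '.join(text.strip().split()).title()
--
--     # Common make name standardizations
--     make_corrections = {
--         'Vw': 'Volkswagen',
--         'Bmw': 'BMW',
--         'Mb': 'Mercedes-Benz',
--         'Mercedes': 'Mercedes-Benz',
--         'Merc': 'Mercedes-Benz',
--         'Alfa': 'Alfa Romeo',
--         'Land': 'Land Rover'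
--     }
--
--     for short, full in make_corrections.items():
--         if cleaned.startswith(short + ' ') or cleaned == short:
--             cleaned = cleaned.replace(short, full, 1)
--
--     return cleaned
-- ===== SOURCE B (Python) =====
-- def clean_make_model(text: str) -> str:
--     """Clean and standardize car make/model text"""
--     if not text:
--         return ""
--
--     # Tokenize once, title-case each word, and fix only the first word
--     # with a single keyed lookup (only the first word can ever match).
--     words = [w.title() for w in text.strip().split()]
--
--     make_corrections = {
--         'Vw': 'Volkswagen',
--         'Bmw': 'BMW',
--         'Mb': 'Mercedes-Benz',
--         'Mercedes': 'Mercedes-Benz',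
--         'Merc': 'Mercedes-Benz',
--         'Alfa': 'Alfa Romeo',
--         'Land': 'Land Rover'
--     }
--
--     if words and words[0] in make_corrections:
--         words[0] = make_corrections[words[0]]
--
--     return ' '.join(words)
-- ===== Notes on version B (the rewrite author's own statement) =====
-- stated objective: idiomatic
-- what changed: B works word-wise: it tokenizes once, title-cases each token, fixes only the first token by one keyed dict lookup, and re-joins, instead of A's title-casing of the whole joined string followed by a scan over all seven correction entries with startswith/replace on the full string.
import Mathlib
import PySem

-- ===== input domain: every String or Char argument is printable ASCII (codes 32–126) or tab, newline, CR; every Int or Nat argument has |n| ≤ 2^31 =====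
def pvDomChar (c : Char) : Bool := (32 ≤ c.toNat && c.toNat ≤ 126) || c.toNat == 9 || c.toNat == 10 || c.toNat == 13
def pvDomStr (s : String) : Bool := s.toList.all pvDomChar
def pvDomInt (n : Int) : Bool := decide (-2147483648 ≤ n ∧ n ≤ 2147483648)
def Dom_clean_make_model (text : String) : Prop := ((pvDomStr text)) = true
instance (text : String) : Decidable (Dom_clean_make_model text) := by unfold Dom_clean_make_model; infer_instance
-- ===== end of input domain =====

set_option maxRecDepth 4000


-- B works word-wise (tokenize, title each word, one keyed lookup on the first word, re-join)
-- instead of A's whole-string title + scan over all seven correction entries (idiomatic; same cost).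

-- ===== PORT A =====
-- str.title() for the ASCII domain: uppercase a letter after a non-letter, lowercase after a letter.
def cmmTitle : Bool → List Char → List Char
  | _, [] => []
  | prev, c :: cs =>
    if PySem.Chars.isalpha c then
      (if prev then PySem.Chars.lowerChar c else PySem.Chars.upperChar c) :: cmmTitle true cs
    else c :: cmmTitle false cs

-- A's line: cleaned = ' '.join(text.strip().split()).title()
def cmmClean (text : String) : List Char :=
  cmmTitle false (PySem.Chars.join [' '] (PySem.Chars.split₀ (PySem.Chars.strip text.toList)))

-- the make_corrections dict literal (insertion order)
def cmmCorrections : List (List Char × List Char) :=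
  [((['V', 'w'] : List Char), (['V', 'o', 'l', 'k', 's', 'w', 'a', 'g', 'e', 'n'] : List Char)), ((['B', 'm', 'w'] : List Char), (['B', 'M', 'W'] : List Char)),
   ((['M', 'b'] : List Char), (['M', 'e', 'r', 'c', 'e', 'd', 'e', 's', '-', 'B', 'e', 'n', 'z'] : List Char)), ((['M', 'e', 'r', 'c', 'e', 'd', 'e', 's'] : List Char), (['M', 'e', 'r', 'c', 'e', 'd', 'e', 's', '-', 'B', 'e', 'n', 'z'] : List Char)),
   ((['M', 'e', 'r', 'c'] : List Char), (['M', 'e', 'r', 'c', 'e', 'd', 'e', 's', '-', 'B', 'e', 'n', 'z'] : List Char)), ((['A', 'l', 'f', 'a'] : List Char), (['A', 'l', 'f', 'a', ' ', 'R', 'o', 'm', 'e', 'o'] : List Char)),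
   ((['L', 'a', 'n', 'd'] : List Char), (['L', 'a', 'n', 'd', ' ', 'R', 'o', 'v', 'e', 'r'] : List Char))]

-- s.replace(old, new, 1): replace the first occurrence of old, scanning left to right (exact port)
def cmmReplace1 (old new : List Char) : List Char → List Char
  | [] => if old.isPrefixOf ([] : List Char) then new ++ List.drop old.length [] else []
  | c :: cs =>
    if old.isPrefixOf (c :: cs) then new ++ (c :: cs).drop old.length
    else c :: cmmReplace1 old new cs

-- loop body of A's for-loop
def cmmStep (c : List Char) (p : List Char × List Char) : List Char :=
  if PySem.Chars.startswith c (p.1 ++ [' ']) || c == p.1 then cmmReplace1 p.1 p.2 c else c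

def clean_make_model (text : String) : String :=
  if text = "" then ""
  else String.ofList (cmmCorrections.foldl cmmStep (cmmClean text))

-- ===== PORT B =====
-- B's per-word w.title(): a single left fold carrying (reversed output, previous-char-was-alpha)
def bTitle (w : List Char) : List Char :=
  ((w.foldl (fun (st : List Char × Bool) c =>
      if PySem.Chars.isalpha c then
        ((if st.2 then PySem.Chars.lowerChar c else PySem.Chars.upperChar c) :: st.1, true)
      else (c :: st.1, false)) ([], false)).1).reverse

-- B's correction dict, written as the string pairs Source B uses
def bCorrections : List (String × String) :=
  [("Vw", "Volkswagen"), ("Bmw", "BMW"), ("Mb", "Mercedes-Benz"), ("Mercedes", "Mercedes-Benz"),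
   ("Merc", "Mercedes-Benz"), ("Alfa", "Alfa Romeo"), ("Land", "Land Rover")]

def clean_make_model_alt (text : String) : String :=
  if text = "" then ""
  else
    let corr := bCorrections.map (fun p => (p.1.toList, p.2.toList))
    let words := (PySem.Chars.split₀ (PySem.Chars.strip text.toList)).map bTitle
    let words' : List (List Char) :=
      match words with
      | [] => []
      | w :: rest => (match List.lookup w corr with | some v => v | none => w) :: rest
    String.ofList (PySem.Chars.join [' '] words')

-- ===== PRECONDITION & SPEC =====
def Spec_clean_make_model (text : String) (out : String) : Prop := out = clean_make_model_alt text
instance (text : String) (out : String) : Decidable (Spec_clean_make_model text out) := by unfold Spec_clean_make_model; infer_instance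

-- ===== CLAIM (what is proved, stated in full; the proofs are below) =====
def Claim_equal_clean_make_model : Prop := ∀ (text : String), Dom_clean_make_model text → Spec_clean_make_model text (clean_make_model text)

-- ===== LEMMAS AND PROOFS =====

-- the title state after a chunk: was the last processed character alphabetic?
def cmmTState (p : Bool) : List Char → Bool
  | [] => p
  | c :: cs => cmmTState (PySem.Chars.isalpha c) cs

lemma cmmTitle_append (xs ys : List Char) (p : Bool) :
    cmmTitle p (xs ++ ys) = cmmTitle p xs ++ cmmTitle (cmmTState p xs) ys := by
  induction xs generalizing p with
  | nil => simp [cmmTitle, cmmTState]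
  | cons c cs ih =>
    by_cases h : PySem.Chars.isalpha c = true <;>
      simp [cmmTitle, cmmTState, h, ih]

lemma bTitle_fold (w acc : List Char) (prev : Bool) :
    ((w.foldl (fun (st : List Char × Bool) c =>
      if PySem.Chars.isalpha c then
        ((if st.2 then PySem.Chars.lowerChar c else PySem.Chars.upperChar c) :: st.1, true)
      else (c :: st.1, false)) (acc, prev)).1).reverse = acc.reverse ++ cmmTitle prev w := by
  induction w generalizing acc prev with
  | nil => simp [cmmTitle]
  | cons c cs ih =>
    by_cases h : PySem.Chars.isalpha c = true <;>
      simp [cmmTitle, h, ih]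

lemma bTitle_eq (w : List Char) : bTitle w = cmmTitle false w := by
  simpa using bTitle_fold w [] false

lemma cmmTitle_join (ws : List (List Char)) :
    cmmTitle false (PySem.Chars.join [' '] ws) =
      PySem.Chars.join [' '] (ws.map (cmmTitle false)) := by
  induction ws with
  | nil => simp [PySem.Chars.join_nil, cmmTitle]
  | cons w ws ih =>
    cases ws with
    | nil => simp [PySem.Chars.join_singleton]
    | cons x xs =>
      rw [PySem.Chars.join_cons_cons, List.append_assoc, cmmTitle_append]
      have hsp : cmmTitle (cmmTState false w) ([' '] ++ PySem.Chars.join [' '] (x :: xs)) =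
          ' ' :: cmmTitle false (PySem.Chars.join [' '] (x :: xs)) := by
        simp [cmmTitle, PySem.Chars.isalpha, PySem.Chars.isupper, PySem.Chars.islower]
      rw [hsp, ih]
      rw [show List.map (cmmTitle false) (w :: x :: xs) =
        cmmTitle false w :: cmmTitle false x :: List.map (cmmTitle false) xs from rfl]
      rw [PySem.Chars.join_cons_cons]
      simp

lemma islower_bounds (c : Char) (h : PySem.Chars.islower c = true) :
    97 ≤ c.toNat ∧ c.toNat ≤ 122 := by
  simp only [PySem.Chars.islower, Bool.and_eq_true, decide_eq_true_eq] at h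
  obtain ⟨h1, h2⟩ := h
  rw [Char.le_def] at h1 h2
  exact ⟨h1, h2⟩

lemma isupper_bounds (c : Char) (h : PySem.Chars.isupper c = true) :
    65 ≤ c.toNat ∧ c.toNat ≤ 90 := by
  simp only [PySem.Chars.isupper, Bool.and_eq_true, decide_eq_true_eq] at h
  obtain ⟨h1, h2⟩ := h
  rw [Char.le_def] at h1 h2
  exact ⟨h1, h2⟩

lemma upperChar_ne_space (c : Char) (h : PySem.Chars.isalpha c = true) :
    (PySem.Chars.upperChar c != ' ') = true := by
  have h32 : (' ' : Char).toNat = 32 := rfl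
  simp only [PySem.Chars.isalpha, Bool.or_eq_true] at h
  simp only [bne_iff_ne, ne_eq]
  unfold PySem.Chars.upperChar
  split_ifs with hl
  · intro heq
    obtain ⟨h1, h2⟩ := islower_bounds c hl
    have hh := congrArg Char.toNat heq
    rw [Char.toNat_ofNat] at hh
    have hv : (c.toNat - 32).isValidChar := Or.inl (by omega)
    rw [if_pos hv] at hh
    omega
  · intro heq
    rcases h with hu | hl'
    · obtain ⟨h1, h2⟩ := isupper_bounds c hu
      have hh := congrArg Char.toNat heq
      omega
    · exact hl hl'

lemma lowerChar_ne_space (c : Char) (h : PySem.Chars.isalpha c = true) :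
    (PySem.Chars.lowerChar c != ' ') = true := by
  have h32 : (' ' : Char).toNat = 32 := rfl
  simp only [PySem.Chars.isalpha, Bool.or_eq_true] at h
  simp only [bne_iff_ne, ne_eq]
  unfold PySem.Chars.lowerChar
  split_ifs with hu
  · intro heq
    obtain ⟨h1, h2⟩ := isupper_bounds c hu
    have hh := congrArg Char.toNat heq
    rw [Char.toNat_ofNat] at hh
    have hv : (c.toNat + 32).isValidChar := Or.inl (by omega)
    rw [if_pos hv] at hh
    omega
  · intro heq
    rcases h with hu' | hl
    · exact hu hu'
    · obtain ⟨h1, h2⟩ := islower_bounds c hl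
      have hh := congrArg Char.toNat heq
      omega

lemma nonspace_ne_space (c : Char) (h : PySem.Chars.isspace c = false) : (c != ' ') = true := by
  simp only [bne_iff_ne, ne_eq]
  intro heq
  subst heq
  simp [PySem.Chars.isspace] at h

lemma cmmTitle_nospace (w : List Char) (p : Bool) (h : ∀ c ∈ w, PySem.Chars.isspace c = false) :
    ∀ c ∈ cmmTitle p w, (c != ' ') = true := by
  induction w generalizing p with
  | nil => simp [cmmTitle]
  | cons c cs ih =>
    intro d hd
    by_cases ha : PySem.Chars.isalpha c = true
    · simp only [cmmTitle, if_pos ha, List.mem_cons] at hd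
      rcases hd with rfl | hd
      · cases p
        · simpa using upperChar_ne_space c ha
        · simpa using lowerChar_ne_space c ha
      · exact ih true (fun e he => h e (by simp [he])) d hd
    · simp only [cmmTitle, if_neg ha, List.mem_cons] at hd
      rcases hd with rfl | hd
      · exact nonspace_ne_space d (h d (by simp))
      · exact ih false (fun e he => h e (by simp [he])) d hd

lemma split₀_go_nospace (s : List Char) : ∀ (cur : List Char) (acc : List (List Char)),
    (∀ c ∈ cur, PySem.Chars.isspace c = false) →
    (∀ w ∈ acc, ∀ c ∈ w, PySem.Chars.isspace c = false) →
    ∀ w ∈ PySem.Chars.split₀.go s cur acc, ∀ c ∈ w, PySem.Chars.isspace c = false := by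
  induction s with
  | nil =>
    intro cur acc hcur hacc w hw
    simp only [PySem.Chars.split₀.go] at hw
    split_ifs at hw with h
    · exact hacc w (by simpa using hw)
    · simp only [List.mem_reverse, List.mem_cons] at hw
      rcases hw with rfl | hw
      · intro c hc; exact hcur c (by simpa using hc)
      · exact hacc w hw
  | cons c cs ih =>
    intro cur acc hcur hacc w hw
    simp only [PySem.Chars.split₀.go] at hw
    split_ifs at hw with h1 h2
    · exact ih [] acc (by simp) hacc w hw
    · refine ih [] (cur.reverse :: acc) (by simp) ?_ w hw
      intro v hv
      rcases List.mem_cons.mp hv with rfl | hv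
      · intro d hd; exact hcur d (by simpa using hd)
      · exact hacc v hv
    · refine ih (c :: cur) acc ?_ hacc w hw
      intro d hd
      rcases List.mem_cons.mp hd with rfl | hd
      · simpa using h1
      · exact hcur d hd

lemma split₀_nospace (s : List Char) (w : List Char) (hw : w ∈ PySem.Chars.split₀ s) :
    ∀ c ∈ w, PySem.Chars.isspace c = false :=
  split₀_go_nospace s [] [] (by simp) (by simp) w hw

lemma cmmReplace1_of_prefix (old new s : List Char) (h : old <+: s) :
    cmmReplace1 old new s = new ++ s.drop old.length := by
  cases s <;> simp_all [cmmReplace1, List.isPrefixOf_iff_prefix]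

lemma cmm_tw_dw (f d : List Char) (hf : ∀ ch ∈ f, (ch != ' ') = true)
    (hd : d = [] ∨ ∃ r, d = ' ' :: r) :
    (f ++ d).takeWhile (fun ch => ch != ' ') = f ∧
    (f ++ d).dropWhile (fun ch => ch != ' ') = d := by
  induction f with
  | nil =>
    rcases hd with rfl | ⟨r, rfl⟩ <;> simp
  | cons c cs ih =>
    have hc := hf c (by simp)
    have := ih (fun ch h => hf ch (by simp [h]))
    simp [hc, this.1, this.2]

lemma cmmStep_fire (s v d : List Char) (hd : d = [] ∨ ∃ r, d = ' ' :: r) :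
    cmmStep (s ++ d) (s, v) = v ++ d := by
  have hc : (PySem.Chars.startswith (s ++ d) (s ++ [' ']) || ((s ++ d) == s)) = true := by
    rcases hd with rfl | ⟨r, rfl⟩
    · simp
    · simp only [Bool.or_eq_true, PySem.Chars.startswith_iff]
      exact Or.inl ⟨r, by simp⟩
  unfold cmmStep
  rw [if_pos hc, cmmReplace1_of_prefix _ _ _ ⟨d, rfl⟩, List.drop_left]

lemma cmmStep_skip (a d s' v : List Char) (i : Nat)
    (hia : i < a.length) (his : i < (s' ++ [' ']).length)
    (hne : (s' ++ [' '])[i]? ≠ a[i]?)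
    (hor : s'.length < a.length ∨ i < s'.length) :
    cmmStep (a ++ d) (s', v) = a ++ d := by
  unfold cmmStep
  rw [if_neg]
  simp only [Bool.or_eq_true, PySem.Chars.startswith_iff, beq_iff_eq, not_or]
  constructor
  · intro hpre
    have h1 : (s' ++ [' '])[i]? = (a ++ d)[i]? := by
      rw [List.getElem?_eq_getElem his, List.getElem?_eq_getElem (by simp; omega)]
      exact congrArg some (hpre.getElem his)
    rw [List.getElem?_append_left hia] at h1
    exact hne h1
  · intro heq
    rcases hor with hlen | hi
    · have := congrArg List.length heq
      simp at this
      omega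
    · have h1 : (a ++ d)[i]? = s'[i]? := by rw [heq]
      rw [List.getElem?_append_left hia] at h1
      have h2 : (s' ++ [' '])[i]? = s'[i]? := List.getElem?_append_left hi
      exact hne (h2.trans h1.symm)

lemma cmmStep_skip_word (f d s' v : List Char) (hf : ∀ ch ∈ f, (ch != ' ') = true)
    (hd : d = [] ∨ ∃ r, d = ' ' :: r) (hs : ∀ ch ∈ s', (ch != ' ') = true)
    (hne : f ≠ s') :
    cmmStep (f ++ d) (s', v) = f ++ d := by
  unfold cmmStep
  rw [if_neg]
  simp only [Bool.or_eq_true, PySem.Chars.startswith_iff, beq_iff_eq, not_or]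
  constructor
  · rintro ⟨t, ht⟩
    have ht' : s' ++ (' ' :: t) = f ++ d := by simpa using ht
    have h1 := (cmm_tw_dw f d hf hd).1
    have h2 := (cmm_tw_dw s' (' ' :: t) hs (Or.inr ⟨t, rfl⟩)).1
    rw [ht', h1] at h2
    exact hne h2
  · intro heq
    rcases hd with rfl | ⟨r, rfl⟩
    · exact hne (by simpa using heq)
    · have hmem : (' ' : Char) ∈ s' := by
        rw [← heq]
        simp
      simpa using hs ' ' hmem

lemma cmm_fold (f d : List Char) (hf : ∀ ch ∈ f, (ch != ' ') = true)
    (hd : d = [] ∨ ∃ r, d = ' ' :: r) :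
    cmmCorrections.foldl cmmStep (f ++ d) = ((List.lookup f cmmCorrections).getD f) ++ d := by
  by_cases h1 : f = (['V', 'w'] : List Char)
  · subst h1
    simp only [cmmCorrections, List.foldl_cons, List.foldl_nil]
    rw [cmmStep_fire _ _ _ hd]
    rw [cmmStep_skip _ _ _ _ 0 (by simp) (by simp) (by simp) (by simp)]
    rw [cmmStep_skip _ _ _ _ 0 (by simp) (by simp) (by simp) (by simp)]
    rw [cmmStep_skip _ _ _ _ 0 (by simp) (by simp) (by simp) (by simp)]
    rw [cmmStep_skip _ _ _ _ 0 (by simp) (by simp) (by simp) (by simp)]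
    rw [cmmStep_skip _ _ _ _ 0 (by simp) (by simp) (by simp) (by simp)]
    rw [cmmStep_skip _ _ _ _ 0 (by simp) (by simp) (by simp) (by simp)]
    rfl
  by_cases h2 : f = (['B', 'm', 'w'] : List Char)
  · subst h2
    simp only [cmmCorrections, List.foldl_cons, List.foldl_nil]
    rw [cmmStep_skip_word _ _ _ _ hf hd (by simp) (by simp)]
    rw [cmmStep_fire _ _ _ hd]
    rw [cmmStep_skip _ _ _ _ 0 (by simp) (by simp) (by simp) (by simp)]
    rw [cmmStep_skip _ _ _ _ 0 (by simp) (by simp) (by simp) (by simp)]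
    rw [cmmStep_skip _ _ _ _ 0 (by simp) (by simp) (by simp) (by simp)]
    rw [cmmStep_skip _ _ _ _ 0 (by simp) (by simp) (by simp) (by simp)]
    rw [cmmStep_skip _ _ _ _ 0 (by simp) (by simp) (by simp) (by simp)]
    rfl
  by_cases h3 : f = (['M', 'b'] : List Char)
  · subst h3
    simp only [cmmCorrections, List.foldl_cons, List.foldl_nil]
    rw [cmmStep_skip_word _ _ _ _ hf hd (by simp) (by simp)]
    rw [cmmStep_skip_word _ _ _ _ hf hd (by simp) (by simp)]
    rw [cmmStep_fire _ _ _ hd]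
    rw [cmmStep_skip _ _ _ _ 8 (by simp) (by simp) (by simp) (by simp)]
    rw [cmmStep_skip _ _ _ _ 4 (by simp) (by simp) (by simp) (by simp)]
    rw [cmmStep_skip _ _ _ _ 0 (by simp) (by simp) (by simp) (by simp)]
    rw [cmmStep_skip _ _ _ _ 0 (by simp) (by simp) (by simp) (by simp)]
    rfl
  by_cases h4 : f = (['M', 'e', 'r', 'c', 'e', 'd', 'e', 's'] : List Char)
  · subst h4
    simp only [cmmCorrections, List.foldl_cons, List.foldl_nil]
    rw [cmmStep_skip_word _ _ _ _ hf hd (by simp) (by simp)]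
    rw [cmmStep_skip_word _ _ _ _ hf hd (by simp) (by simp)]
    rw [cmmStep_skip_word _ _ _ _ hf hd (by simp) (by simp)]
    rw [cmmStep_fire _ _ _ hd]
    rw [cmmStep_skip _ _ _ _ 4 (by simp) (by simp) (by simp) (by simp)]
    rw [cmmStep_skip _ _ _ _ 0 (by simp) (by simp) (by simp) (by simp)]
    rw [cmmStep_skip _ _ _ _ 0 (by simp) (by simp) (by simp) (by simp)]
    rfl
  by_cases h5 : f = (['M', 'e', 'r', 'c'] : List Char)
  · subst h5
    simp only [cmmCorrections, List.foldl_cons, List.foldl_nil]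
    rw [cmmStep_skip_word _ _ _ _ hf hd (by simp) (by simp)]
    rw [cmmStep_skip_word _ _ _ _ hf hd (by simp) (by simp)]
    rw [cmmStep_skip_word _ _ _ _ hf hd (by simp) (by simp)]
    rw [cmmStep_skip_word _ _ _ _ hf hd (by simp) (by simp)]
    rw [cmmStep_fire _ _ _ hd]
    rw [cmmStep_skip _ _ _ _ 0 (by simp) (by simp) (by simp) (by simp)]
    rw [cmmStep_skip _ _ _ _ 0 (by simp) (by simp) (by simp) (by simp)]
    rfl
  by_cases h6 : f = (['A', 'l', 'f', 'a'] : List Char)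
  · subst h6
    simp only [cmmCorrections, List.foldl_cons, List.foldl_nil]
    rw [cmmStep_skip_word _ _ _ _ hf hd (by simp) (by simp)]
    rw [cmmStep_skip_word _ _ _ _ hf hd (by simp) (by simp)]
    rw [cmmStep_skip_word _ _ _ _ hf hd (by simp) (by simp)]
    rw [cmmStep_skip_word _ _ _ _ hf hd (by simp) (by simp)]
    rw [cmmStep_skip_word _ _ _ _ hf hd (by simp) (by simp)]
    rw [cmmStep_fire _ _ _ hd]
    rw [cmmStep_skip _ _ _ _ 0 (by simp) (by simp) (by simp) (by simp)]
    rfl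
  by_cases h7 : f = (['L', 'a', 'n', 'd'] : List Char)
  · subst h7
    simp only [cmmCorrections, List.foldl_cons, List.foldl_nil]
    rw [cmmStep_skip_word _ _ _ _ hf hd (by simp) (by simp)]
    rw [cmmStep_skip_word _ _ _ _ hf hd (by simp) (by simp)]
    rw [cmmStep_skip_word _ _ _ _ hf hd (by simp) (by simp)]
    rw [cmmStep_skip_word _ _ _ _ hf hd (by simp) (by simp)]
    rw [cmmStep_skip_word _ _ _ _ hf hd (by simp) (by simp)]
    rw [cmmStep_skip_word _ _ _ _ hf hd (by simp) (by simp)]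
    rw [cmmStep_fire _ _ _ hd]
    rfl
  simp only [cmmCorrections, List.foldl_cons, List.foldl_nil]
  rw [cmmStep_skip_word _ _ _ _ hf hd (by simp) h1,
      cmmStep_skip_word _ _ _ _ hf hd (by simp) h2,
      cmmStep_skip_word _ _ _ _ hf hd (by simp) h3,
      cmmStep_skip_word _ _ _ _ hf hd (by simp) h4,
      cmmStep_skip_word _ _ _ _ hf hd (by simp) h5,
      cmmStep_skip_word _ _ _ _ hf hd (by simp) h6,
      cmmStep_skip_word _ _ _ _ hf hd (by simp) h7]
  have e1 : (f == (['V', 'w'] : List Char)) = false := by simp [h1]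
  have e2 : (f == (['B', 'm', 'w'] : List Char)) = false := by simp [h2]
  have e3 : (f == (['M', 'b'] : List Char)) = false := by simp [h3]
  have e4 : (f == (['M', 'e', 'r', 'c', 'e', 'd', 'e', 's'] : List Char)) = false := by simp [h4]
  have e5 : (f == (['M', 'e', 'r', 'c'] : List Char)) = false := by simp [h5]
  have e6 : (f == (['A', 'l', 'f', 'a'] : List Char)) = false := by simp [h6]
  have e7 : (f == (['L', 'a', 'n', 'd'] : List Char)) = false := by simp [h7]
  simp [List.lookup, e1, e2, e3, e4, e5, e6, e7]

lemma bCorr_toList : bCorrections.map (fun p => (p.1.toList, p.2.toList)) = cmmCorrections := by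
  decide

lemma join_cons_shape (x : List Char) (ts : List (List Char)) :
    PySem.Chars.join [' '] (x :: ts) =
      x ++ (if ts = [] then [] else ' ' :: PySem.Chars.join [' '] ts) := by
  cases ts with
  | nil => simp [PySem.Chars.join, List.intercalate]
  | cons y ys =>
    rw [PySem.Chars.join_cons_cons]
    simp

-- ===== VERDICT =====
theorem clean_make_model_spec : Claim_equal_clean_make_model := by
  intro text _
  unfold Spec_clean_make_model clean_make_model clean_make_model_alt
  by_cases ht : text = ""
  · simp [ht]
  · rw [if_neg ht, if_neg ht]
    simp only [bCorr_toList]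
    unfold cmmClean
    rw [cmmTitle_join]
    cases hws : PySem.Chars.split₀ (PySem.Chars.strip text.toList) with
    | nil =>
      simp only [List.map_nil, PySem.Chars.join_nil]
      have := cmm_fold [] [] (by simp) (Or.inl rfl)
      simp only [List.nil_append] at this
      rw [this]
      simp [cmmCorrections, List.lookup]
    | cons w ws =>
      simp only [List.map_cons]
      rw [join_cons_shape, join_cons_shape]
      have hf : ∀ ch ∈ cmmTitle false w, (ch != ' ') = true := by
        refine cmmTitle_nospace w false ?_
        intro c hc
        exact split₀_nospace _ w (by rw [hws]; simp) c hc
      have hd : (if ws.map (cmmTitle false) = [] then ([] : List Char)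
            else ' ' :: PySem.Chars.join [' '] (ws.map (cmmTitle false))) = [] ∨
          ∃ r, (if ws.map (cmmTitle false) = [] then ([] : List Char)
            else ' ' :: PySem.Chars.join [' '] (ws.map (cmmTitle false))) = ' ' :: r := by
        split_ifs with h
        · exact Or.inl rfl
        · exact Or.inr ⟨_, rfl⟩
      rw [cmm_fold _ _ hf hd]
      have hbt : bTitle w = cmmTitle false w := bTitle_eq w
      have hmap : ws.map bTitle = ws.map (cmmTitle false) := by
        simp [funext bTitle_eq]
      rw [hbt, hmap]
      cases hl : List.lookup (cmmTitle false w) cmmCorrections with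
      | none => simp
      | some v => simp
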